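-- pv_equiv track=rewrite | github.com/jordibc/args_gui | args_gui.py | get_args_info
-- ===== SOURCE A (Python) =====
-- def get_args_info(full_help):
--     "Return string with only the description of arguments taken from full_help"
--     text = ''
--     include = False
--     for line in full_help.splitlines(keepends=True):
--         if (line.startswith('positional arguments:') or
--             line.startswith('optional arguments:')):
--             include = True
--         if include:
--             text += line
--     return text
-- ===== SOURCE B (Python) =====
-- def get_args_info(full_help):
--     "Return string with only the description of arguments taken from full_help"
--     at_line_start = True
--     for i, c in enumerate(full_help):
--         if at_line_start and (full_help.startswith('positional arguments:', i) or
--                               full_help.startswith('optional arguments:', i)):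
--             return full_help[i:]
--         at_line_start = c in '\n\r'
--     return ''
-- ===== Notes on version B (the rewrite author's own statement) =====
-- stated objective: alternative
-- what changed: Replaces splitting into lines and a boolean-flag accumulation over lines by a single character-level scan that finds the first line-start position where a header begins and returns the raw suffix of the string from there.
import Mathlib
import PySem

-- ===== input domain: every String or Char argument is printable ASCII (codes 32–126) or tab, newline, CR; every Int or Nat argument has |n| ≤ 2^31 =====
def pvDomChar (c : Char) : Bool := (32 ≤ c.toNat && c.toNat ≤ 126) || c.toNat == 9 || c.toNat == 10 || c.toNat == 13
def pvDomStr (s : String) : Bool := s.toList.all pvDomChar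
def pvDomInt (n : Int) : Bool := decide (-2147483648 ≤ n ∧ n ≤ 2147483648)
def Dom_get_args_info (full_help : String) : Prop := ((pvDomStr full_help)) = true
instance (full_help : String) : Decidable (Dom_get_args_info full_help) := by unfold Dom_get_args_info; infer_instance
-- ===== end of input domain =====

-- B replaces A's split-into-lines + boolean-flag accumulation by a single character scan
-- that returns the raw suffix from the first line-start position where a header begins.

-- ===== PORT A =====
-- Hand port of str.splitlines(keepends=True): exact on the stated ASCII domain,
-- where the only line terminators are '\n', '\r' and '\r\n'.
def pvSplitlinesKeep (acc : List Char) : List Char → List (List Char)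
  | [] => if acc = [] then [] else [acc.reverse]
  | '\r' :: '\n' :: rest => (acc.reverse ++ ['\r', '\n']) :: pvSplitlinesKeep [] rest
  | c :: rest =>
      if c = '\n' ∨ c = '\r' then (acc.reverse ++ [c]) :: pvSplitlinesKeep [] rest
      else pvSplitlinesKeep (c :: acc) rest

-- line.startswith('positional arguments:') or line.startswith('optional arguments:')
def pvIsHeader (line : List Char) : Bool :=
  PySem.Chars.startswith line "positional arguments:".toList ||
  PySem.Chars.startswith line "optional arguments:".toList

-- one iteration of A's loop over state (text, include)
def pvAStep (st : List Char × Bool) (line : List Char) : List Char × Bool :=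
  let inc := if pvIsHeader line then true else st.2
  (if inc then st.1 ++ line else st.1, inc)

def get_args_info (full_help : String) : String :=
  String.ofList (((pvSplitlinesKeep [] full_help.toList).foldl pvAStep ([], false)).1)

-- ===== PORT B =====
-- c in '\n\r'
def pvIsNL (c : Char) : Bool := c = '\n' || c = '\r'

-- full_help.startswith(h, i) on the suffix starting at i, for the two headers
def pvHeaderAt (s : List Char) : Bool :=
  "positional arguments:".toList.isPrefixOf s ||
  "optional arguments:".toList.isPrefixOf s

-- the for-loop of B: walk the characters, tracking whether we are at a line start
def pvScan (atStart : Bool) : List Char → List Char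
  | [] => []
  | c :: rest =>
      if atStart && pvHeaderAt (c :: rest) then c :: rest
      else pvScan (pvIsNL c) rest

def get_args_info_alt (full_help : String) : String :=
  String.ofList (pvScan true full_help.toList)

-- ===== PRECONDITION & SPEC =====
def Spec_get_args_info (full_help : String) (out : String) : Prop := out = get_args_info_alt full_help
instance (full_help : String) (out : String) : Decidable (Spec_get_args_info full_help out) := by unfold Spec_get_args_info; infer_instance

-- ===== CLAIM (what is proved, stated in full; the proofs are below) =====
def Claim_equal_get_args_info : Prop := ∀ (full_help : String), Dom_get_args_info full_help → Spec_get_args_info full_help (get_args_info full_help)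

-- ===== LEMMAS AND PROOFS =====

-- what A keeps, as a function of the line list
def pvG (ls : List (List Char)) : List Char :=
  match ls.findIdx? pvIsHeader with
  | some i => (ls.drop i).flatten
  | none => []

-- once include is true, A appends every remaining line
theorem foldA_true (ls : List (List Char)) (acc : List Char) :
    (ls.foldl pvAStep (acc, true)).1 = acc ++ ls.flatten := by
  induction ls generalizing acc with
  | nil => simp
  | cons l rest ih => simp [List.foldl_cons, pvAStep, ih, List.append_assoc]

-- from include = false, A's result is the flattened suffix from the first header line
theorem foldA_false (ls : List (List Char)) (acc : List Char) :
    (ls.foldl pvAStep (acc, false)).1 = acc ++ pvG ls := by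
  induction ls generalizing acc with
  | nil => simp [pvG]
  | cons l rest ih =>
      by_cases h : pvIsHeader l = true
      · simp only [List.foldl_cons, pvAStep, h, if_true, pvG, List.findIdx?_cons,
          List.drop_zero, List.flatten_cons]
        rw [foldA_true]
        simp [List.append_assoc]
      · simp only [List.foldl_cons, pvAStep, h, if_false, Bool.false_eq_true, pvG,
          List.findIdx?_cons]
        rw [ih]
        unfold pvG
        cases rest.findIdx? pvIsHeader <;> simp

-- pvIsHeader and pvHeaderAt test the same prefix property
theorem isHeader_iff (l : List Char) :
    pvIsHeader l = true ↔ ("positional arguments:".toList <+: l ∨ "optional arguments:".toList <+: l) := by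
  simp [pvIsHeader, PySem.Chars.startswith_iff]

theorem headerAt_iff (l : List Char) :
    pvHeaderAt l = true ↔ ("positional arguments:".toList <+: l ∨ "optional arguments:".toList <+: l) := by
  simp [pvHeaderAt, List.isPrefixOf_iff_prefix]

-- a header never holds of a list that is a prefix of a non-header list
theorem isHeader_false_of_prefix {l t : List Char} (h : l <+: t) (ht : pvHeaderAt t = false) :
    pvIsHeader l = false := by
  rw [← Bool.not_eq_true] at *
  intro hl
  apply ht
  rw [isHeader_iff] at hl
  rw [headerAt_iff]
  rcases hl with h1 | h1
  · exact Or.inl (h1.trans h)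
  · exact Or.inr (h1.trans h)

-- flatten of splitlines restores the text
theorem flatten_split (s acc : List Char) :
    (pvSplitlinesKeep acc s).flatten = acc.reverse ++ s := by
  fun_induction pvSplitlinesKeep acc s <;> simp_all

-- a prefix that avoids the next character stops inside the first part
theorem prefix_stop {h p t : List Char} {c : Char} (hp : h <+: p ++ c :: t)
    (hc : ¬ c ∈ h) : h <+: p := by
  by_cases hl : h.length ≤ p.length
  · exact List.prefix_of_prefix_length_le hp (List.prefix_append p (c :: t)) hl
  · exfalso
    apply hc
    have h1 : p ++ [c] <+: p ++ c :: t := by simp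
    have h2 : p ++ [c] <+: h :=
      List.prefix_of_prefix_length_le h1 hp (by simp; omega)
    exact h2.mem (by simp)

-- a line never starts with a header character '\n' or '\r'
theorem not_header_nl (c : Char) (t : List Char) (hc : pvIsNL c = true) :
    pvHeaderAt (c :: t) = false := by
  rw [← Bool.not_eq_true, headerAt_iff]
  rintro (h | h) <;>
  · rcases h with ⟨u, hu⟩
    have := congrArg (fun l => l[0]?) hu
    simp [pvIsNL] at this hc
    rcases hc with rfl | rfl <;> simp_all

-- a header holds of the first line iff it holds of the whole remaining text
theorem isHeader_line {p t : List Char} {c : Char} (hc : pvIsNL c = true)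
    (h : pvHeaderAt ((p ++ [c]) ++ t) = true) : pvIsHeader (p ++ [c]) = true := by
  rw [headerAt_iff] at h
  rw [isHeader_iff]
  simp [pvIsNL] at hc
  rcases h with h | h
  · refine Or.inl ((prefix_stop (by simpa using h) ?_).trans (List.prefix_append p [c]))
    intro hm
    rcases hc with rfl | rfl <;> revert hm <;> decide
  · refine Or.inr ((prefix_stop (by simpa using h) ?_).trans (List.prefix_append p [c]))
    intro hm
    rcases hc with rfl | rfl <;> revert hm <;> decide

-- if a header starts at the current line start, A keeps the whole remaining text
theorem pvG_of_header (acc s : List Char) :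
    pvHeaderAt (acc.reverse ++ s) = true → acc.all (fun c => !pvIsNL c) = true →
    pvG (pvSplitlinesKeep acc s) = acc.reverse ++ s := by
  fun_induction pvSplitlinesKeep acc s with
  | case1 =>
      intro h _
      exact absurd h (by decide)
  | case2 acc hne =>
      intro h _
      have hh : pvIsHeader acc.reverse = true := by
        rw [isHeader_iff]; rw [headerAt_iff] at h; simpa using h
      simp [pvG, List.findIdx?_cons, hh]
  | case3 acc rest ih =>
      intro h _
      have hh : pvIsHeader (acc.reverse ++ ['\r', '\n']) = true := by
        have : pvHeaderAt ((acc.reverse ++ ['\r']) ++ '\n' :: rest) = true := by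
          simpa using h
        have h1 := isHeader_line (c := '\r') (by decide)
          (p := acc.reverse) (t := '\n' :: rest) (by simpa using h)
        rw [isHeader_iff] at h1 ⊢
        rcases h1 with h1 | h1
        · exact Or.inl (h1.trans (by simp))
        · exact Or.inr (h1.trans (by simp))
      simp only [pvG, List.findIdx?_cons, hh]
      simpa using flatten_split rest []
  | case4 acc c rest hpat hnl ih =>
      intro h _
      have hc : pvIsNL c = true := by
        rcases hnl with rfl | rfl <;> decide
      have hh : pvIsHeader (acc.reverse ++ [c]) = true :=
        isHeader_line hc (by simpa using h)
      simp only [pvG, List.findIdx?_cons, hh]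
      simpa using flatten_split rest []
  | case5 acc c rest hpat hnl ih =>
      intro h hall
      have hc : pvIsNL c = false := by
        simp [pvIsNL]; tauto
      have := ih (by simpa using h) (by simp [hall, hc])
      simpa using this

-- a non-header first line does not change what A keeps
theorem pvG_cons_false {l : List Char} {ls : List (List Char)}
    (h : pvIsHeader l = false) : pvG (l :: ls) = pvG ls := by
  simp only [pvG, List.findIdx?_cons, h]
  cases ls.findIdx? pvIsHeader <;> simp

-- main invariant: A's kept text = B's scan, aligned character by character
theorem main_inv (s acc : List Char) :
    (acc = [] ∨ pvHeaderAt (acc.reverse ++ s) = false) →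
    pvG (pvSplitlinesKeep acc s) = pvScan acc.isEmpty s := by
  fun_induction pvSplitlinesKeep acc s with
  | case1 =>
      intro _; simp [pvG, pvScan]
  | case2 acc hne =>
      rintro (rfl | hA)
      · exact absurd rfl hne
      · have hh : pvIsHeader acc.reverse = false := by
          rw [← Bool.not_eq_true, isHeader_iff]
          rw [← Bool.not_eq_true, headerAt_iff] at hA
          simpa using hA
        simp [pvG, List.findIdx?_cons, hh, pvScan]
  | case3 acc rest ih =>
      intro hyp
      have hA : pvHeaderAt (acc.reverse ++ '\r' :: '\n' :: rest) = false := by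
        rcases hyp with rfl | hA
        · simpa using not_header_nl '\r' ('\n' :: rest) (by decide)
        · exact hA
      have hh : pvIsHeader (acc.reverse ++ ['\r', '\n']) = false :=
        isHeader_false_of_prefix ⟨rest, by simp⟩ hA
      have hs : pvScan acc.isEmpty ('\r' :: '\n' :: rest) = pvScan true rest := by
        have h1 : pvHeaderAt ('\r' :: '\n' :: rest) = false :=
          not_header_nl _ _ (by decide)
        have h2 : pvHeaderAt ('\n' :: rest) = false :=
          not_header_nl _ _ (by decide)
        simp [pvScan, h1, h2, pvIsNL]
      rw [hs, pvG_cons_false hh]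
      have := ih (Or.inl rfl)
      simpa using this
  | case4 acc c rest hpat hnl ih =>
      intro hyp
      have hc : pvIsNL c = true := by
        rcases hnl with rfl | rfl <;> decide
      have hA : pvHeaderAt (acc.reverse ++ c :: rest) = false := by
        rcases hyp with rfl | hA
        · simpa using not_header_nl c rest hc
        · exact hA
      have hh : pvIsHeader (acc.reverse ++ [c]) = false :=
        isHeader_false_of_prefix ⟨rest, by simp⟩ hA
      have hs : pvScan acc.isEmpty (c :: rest) = pvScan true rest := by
        have h1 : pvHeaderAt (c :: rest) = false := not_header_nl _ _ hc
        simp [pvScan, h1, hc]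
      rw [hs, pvG_cons_false hh]
      have := ih (Or.inl rfl)
      simpa using this
  | case5 acc c rest hpat hnl ih =>
      intro hyp
      have hc : pvIsNL c = false := by
        simp [pvIsNL]; tauto
      cases acc with
      | nil =>
          by_cases hH : pvHeaderAt (c :: rest) = true
          · have := pvG_of_header [c] rest (by simpa using hH) (by simp [hc])
            simp only [List.reverse_cons, List.reverse_nil, List.nil_append,
              List.singleton_append] at this
            simp [this, pvScan, hH]
          · have := ih (Or.inr (by simpa using (Bool.not_eq_true _).mp hH))
            simp only [List.isEmpty_cons] at this
            simp [this, pvScan, (Bool.not_eq_true _).mp hH, hc]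
      | cons a as =>
          have hA := hyp.resolve_left (by simp)
          have := ih (Or.inr (by simpa using hA))
          simp only [List.isEmpty_cons] at this
          simp [this, pvScan, hc]

-- ===== VERDICT (by name: the statement is the Claim_ definition above) =====
theorem get_args_info_spec : Claim_equal_get_args_info := by
  intro full_help _
  unfold Spec_get_args_info get_args_info get_args_info_alt
  have h := main_inv full_help.toList [] (Or.inl rfl)
  simp only [List.isEmpty_nil] at h
  rw [foldA_false, List.nil_append, h]
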